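-- pv_equiv track=rewrite | github.com/MayJarung/OOD | Sort/DontCareNegativeSort.py | buble
-- ===== SOURCE A (Python) =====
-- def buble(L):
--     for last in range(len(L)-1, 0, -1):
--         for i in range(last):
--             swap = False
--             count = 0
--             while not swap and i + count < len(L):
--                 if L[i] > L[i+count] and L[i] >= 0  and L[i+count] >= 0:
--                     L[i], L[i+count] = L[i+count], L[i] # swap
--                     swap = True
--                 else:
--                     count += 1
--     return L
-- ===== SOURCE B (Python) =====
-- def buble(L):
--     # Sort the non-negative values ascending, leaving negatives fixed in place.
--     # (A sorts L in place and returns it; B returns a fresh list with the same value.)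
--     it = iter(sorted(x for x in L if x >= 0))
--     return [x if x < 0 else next(it) for x in L]
-- ===== Notes on version B (the rewrite author's own statement) =====
-- stated objective: faster
-- what changed: B replaces A's triple-nested swap-scanning bubble passes by one pass that extracts the non-negative values, sorts them with the built-in sort, and streams them back into the non-negative positions; B returns a fresh list and does not mutate its argument, while A sorts L in place (same return value).
import Mathlib
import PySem

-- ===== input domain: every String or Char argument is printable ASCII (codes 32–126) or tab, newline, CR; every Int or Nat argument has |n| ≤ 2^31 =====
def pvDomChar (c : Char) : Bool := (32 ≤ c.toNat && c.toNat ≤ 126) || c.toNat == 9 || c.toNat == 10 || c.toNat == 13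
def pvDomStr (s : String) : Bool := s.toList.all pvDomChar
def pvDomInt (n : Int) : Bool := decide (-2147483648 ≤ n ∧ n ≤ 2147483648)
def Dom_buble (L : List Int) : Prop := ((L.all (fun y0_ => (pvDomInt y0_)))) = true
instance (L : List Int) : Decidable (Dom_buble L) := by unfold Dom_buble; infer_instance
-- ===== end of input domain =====

-- B sorts the non-negative values with one built-in sort and streams them back into the
-- non-negative positions (O(n log n)) instead of A's triple-nested swap-scanning passes.
-- A sorts L in place and returns it; B returns a fresh list: the equivalence is about the return value.

-- ===== PORT A =====
-- the 'while not swap and i+count < len(L)' loop: either performs the first admissible swap or returns L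
def bubleWhile (L : List Int) (i : Int) (count : Int) : List Int :=
  if h : i + count < PySem.List.len L then
    if PySem.List.pyGetD L i 0 > PySem.List.pyGetD L (i + count) 0 ∧
       0 ≤ PySem.List.pyGetD L i 0 ∧ 0 ≤ PySem.List.pyGetD L (i + count) 0 then
      -- L[i], L[i+count] = L[i+count], L[i]
      PySem.List.pySetD (PySem.List.pySetD L i (PySem.List.pyGetD L (i + count) 0))
        (i + count) (PySem.List.pyGetD L i 0)
    else bubleWhile L i (count + 1)
  else L
termination_by (PySem.List.len L - (i + count)).toNat
decreasing_by simp only [PySem.List.len_eq] at *; omega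

def buble (L : List Int) : List Int :=
  (PySem.List.pyRange (PySem.List.len L - 1) 0 (-1)).foldl
    (fun M last =>
      (PySem.List.pyRange 0 last 1).foldl (fun N i => bubleWhile N i 0) M) L

-- ===== PORT B =====
-- 'return [x if x < 0 else next(it) for x in L]': negatives kept, others drawn from the sorted stream
def fillNonNeg : List Int → List Int → List Int
  | [], _ => []
  | x :: xs, vs =>
    if x < 0 then x :: fillNonNeg xs vs
    else
      match vs with
      | v :: vt => v :: fillNonNeg xs vt
      | [] => []    -- unreachable: the stream yields one value per non-negative slot

def buble_alt (L : List Int) : List Int :=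
  fillNonNeg L
    (PySem.List.sorted (L.filter (fun x => decide (0 ≤ x))) (fun x => x) false)

-- ===== PRECONDITION & SPEC =====
def Spec_buble (L : List Int) (out : List Int) : Prop := out = buble_alt L
instance (L : List Int) (out : List Int) : Decidable (Spec_buble L out) := by unfold Spec_buble; infer_instance

-- ===== CLAIM (what is proved, stated in full; the proofs are below) =====
def Claim_equal_buble : Prop := ∀ (L : List Int), Dom_buble L → Spec_buble L (buble L)

-- ===== LEMMAS AND PROOFS =====

-- Nat-indexed proof-side model of A's loops
def swapN (M : List Int) (i j : Nat) : List Int :=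
  (M.set i (M.getD j 0)).set j (M.getD i 0)

def findJ (M : List Int) (i j : Nat) : Option Nat :=
  if _h : j < M.length then
    if M.getD i 0 > M.getD j 0 ∧ 0 ≤ M.getD i 0 ∧ 0 ≤ M.getD j 0 then some j
    else findJ M i (j + 1)
  else none
termination_by M.length - j

def stepN (M : List Int) (i : Nat) : List Int :=
  match findJ M i i with
  | none => M
  | some j => swapN M i j

def passN (M : List Int) : Nat → List Int
  | 0 => M
  | k + 1 => stepN (passN M k) k

def descList : Nat → List Nat
  | 0 => []
  | k + 1 => (k + 1) :: descList k

def outerN (M : List Int) (ls : List Nat) : List Int := ls.foldl passN M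

-- invariants
def SInv (M : List Int) (s : Nat) : Prop :=
  ∀ p q : Nat, p < q → q < M.length → s ≤ q →
    0 ≤ M.getD p 0 → 0 ≤ M.getD q 0 → M.getD p 0 ≤ M.getD q 0

def DInv (M : List Int) (k : Nat) : Prop :=
  ∀ p q : Nat, p < k → k ≤ q → q < M.length →
    0 ≤ M.getD p 0 → 0 ≤ M.getD q 0 →
    (∀ r, k ≤ r → r < q → ¬ 0 ≤ M.getD r 0) → M.getD p 0 ≤ M.getD q 0

def ShapeP (M M' : List Int) : Prop :=
  M'.length = M.length ∧
  ∀ p, p < M.length → (M.getD p 0 < 0 ∨ M'.getD p 0 < 0) → M'.getD p 0 = M.getD p 0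

-- bridges
theorem bubleWhile_eq (M : List Int) (i : Nat) : ∀ (d c : Nat), M.length - (i + c) ≤ d →
    bubleWhile M (i : Int) (c : Int) =
      (match findJ M i (i + c) with
       | none => M
       | some j => swapN M i j) := by
  intro d
  induction d with
  | zero =>
    intro c hc
    rw [bubleWhile, findJ]
    rw [dif_neg (by simp only [PySem.List.len_eq]; omega), dif_neg (by omega)]
  | succ d ih =>
    intro c hc
    rw [bubleWhile, findJ]
    by_cases hlt : i + c < M.length
    · rw [dif_pos (by simp only [PySem.List.len_eq]; omega), dif_pos hlt]
      have hcast : (i : Int) + (c : Int) = ((i + c : Nat) : Int) := by push_cast; ring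
      rw [hcast]
      simp only [PySem.List.pyGetD_natCast, PySem.List.pySetD_natCast]
      by_cases hcond : M.getD i 0 > M.getD (i + c) 0 ∧ 0 ≤ M.getD i 0 ∧ 0 ≤ M.getD (i + c) 0
      · rw [if_pos hcond, if_pos hcond]
        rfl
      · rw [if_neg hcond, if_neg hcond]
        have h1 : ((c : Int) + 1) = ((c + 1 : Nat) : Int) := by push_cast; ring
        rw [h1, ih (c + 1) (by omega)]
        have h2 : i + (c + 1) = i + c + 1 := by omega
        rw [h2]
    · rw [dif_neg (by simp only [PySem.List.len_eq]; omega), dif_neg hlt]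

theorem bubleWhile_zero (M : List Int) (i : Nat) :
    bubleWhile M (i : Int) 0 = stepN M i := by
  have h0 : (0 : Int) = ((0 : Nat) : Int) := rfl
  rw [h0, bubleWhile_eq M i (M.length) 0 (by omega)]
  rw [Nat.add_zero]
  rfl

theorem inner_eq (M : List Int) (l : Nat) :
    (PySem.List.pyRange 0 (l : Int) 1).foldl (fun N i => bubleWhile N i 0) M = passN M l := by
  induction l generalizing M with
  | zero => rw [PySem.List.pyRange_one_eq_nil (by omega)]; rfl
  | succ l ih =>
    have h1 : ((l + 1 : Nat) : Int) = (l : Int) + 1 := by push_cast; ring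
    rw [h1, PySem.List.pyRange_one_succ_right (by omega), List.foldl_append]
    rw [ih]
    simp only [List.foldl]
    rw [bubleWhile_zero]
    rfl

theorem pyRange_countdown (k : Nat) :
    PySem.List.pyRange (k : Int) 0 (-1) = (descList k).map (Nat.cast) := by
  induction k with
  | zero => rw [PySem.List.pyRange_neg_one_eq_nil (by omega)]; rfl
  | succ k ih =>
    rw [PySem.List.pyRange_neg_one_cons (by omega)]
    have h1 : ((k + 1 : Nat) : Int) - 1 = (k : Int) := by push_cast; ring
    rw [h1, ih]
    rfl

theorem foldl_inner_eq (ls : List Nat) : ∀ M : List Int,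
    ls.foldl (fun (x : List Int) (y : Nat) =>
      (PySem.List.pyRange 0 (y : Int) 1).foldl (fun N i => bubleWhile N i 0) x) M
      = ls.foldl passN M := by
  induction ls with
  | nil => intro M; rfl
  | cons a ls ih =>
    intro M
    simp only [List.foldl_cons]
    rw [inner_eq, ih]

theorem buble_eq_outerN (L : List Int) :
    buble L = outerN L (descList (L.length - 1)) := by
  unfold buble outerN
  cases hn : L.length with
  | zero =>
    have hL : L = [] := List.length_eq_zero_iff.mp hn
    subst hL
    rw [PySem.List.pyRange_neg_one_eq_nil (by simp [PySem.List.len_eq])]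
    rfl
  | succ m =>
    have h1 : PySem.List.len L - 1 = ((m : Nat) : Int) := by simp [PySem.List.len_eq, hn]
    rw [h1, pyRange_countdown, List.foldl_map]
    simp only [Nat.add_sub_cancel]
    exact foldl_inner_eq (descList m) L

-- findJ characterisation
theorem findJ_none (M : List Int) (i j : Nat) (h : findJ M i j = none) :
    ∀ r, j ≤ r → r < M.length →
      ¬ (M.getD i 0 > M.getD r 0 ∧ 0 ≤ M.getD i 0 ∧ 0 ≤ M.getD r 0) := by
  fun_induction findJ M i j with
  | case1 => simp_all
  | case2 j hlt hc ih =>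
    intro r hjr hr
    rcases Nat.eq_or_lt_of_le hjr with rfl | h2
    · exact hc
    · exact ih h r h2 hr
  | case3 j hge =>
    intro r hjr hr
    omega

theorem findJ_some (M : List Int) (i j j' : Nat) (h : findJ M i j = some j') :
    j ≤ j' ∧ j' < M.length ∧
    (M.getD i 0 > M.getD j' 0 ∧ 0 ≤ M.getD i 0 ∧ 0 ≤ M.getD j' 0) ∧
    ∀ r, j ≤ r → r < j' →
      ¬ (M.getD i 0 > M.getD r 0 ∧ 0 ≤ M.getD i 0 ∧ 0 ≤ M.getD r 0) := by
  fun_induction findJ M i j with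
  | case1 j hlt hc =>
    obtain rfl : j = j' := by simpa using h
    exact ⟨le_refl _, hlt, hc, fun r h1 h2 => by omega⟩
  | case2 j hlt hc ih =>
    obtain ⟨h1, h2, h3, h4⟩ := ih h
    exact ⟨by omega, h2, h3, fun r hr1 hr2 => by
      rcases Nat.eq_or_lt_of_le hr1 with rfl | hlt2
      · exact hc
      · exact h4 r hlt2 hr2⟩
  | case3 => simp_all

-- swap basics
theorem length_swapN (M : List Int) (i j : Nat) : (swapN M i j).length = M.length := by
  simp [swapN]

theorem getD_set' (M : List Int) (i : Nat) (a : Int) (p : Nat) :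
    (M.set i a).getD p 0 = if p = i ∧ i < M.length then a else M.getD p 0 := by
  simp only [List.getD, List.getElem?_set]
  split_ifs <;> simp_all

theorem getD_swapN (M : List Int) (i j p : Nat) (hi : i < M.length) (hj : j < M.length) :
    (swapN M i j).getD p 0 =
      if p = j then M.getD i 0 else if p = i then M.getD j 0 else M.getD p 0 := by
  simp only [swapN, getD_set', List.length_set]
  split_ifs <;> simp_all

theorem cons_getD_set_perm (xs : List Int) (k : Nat) (x : Int) (hk : k < xs.length) :
    (xs.getD k 0 :: xs.set k x).Perm (x :: xs) := by
  induction xs generalizing k with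
  | nil => simp at hk
  | cons y ys ih =>
    cases k with
    | zero => simpa using List.Perm.swap x y ys
    | succ k =>
      simp only [List.getD_cons_succ, List.set_cons_succ]
      exact ((List.Perm.swap _ _ _).trans (((ih k (by simpa using hk)).cons y))).trans
        (List.Perm.swap _ _ _)

theorem swapN_perm (M : List Int) (i j : Nat) (hi : i < M.length) (hj : j < M.length) :
    (swapN M i j).Perm M := by
  induction M generalizing i j with
  | nil => simp at hi
  | cons x xs ih =>
    cases i with
    | zero =>
      cases j with
      | zero => simp [swapN]
      | succ j =>
        simp only [swapN, List.getD_cons_succ, List.getD_cons_zero, List.set_cons_zero,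
          List.set_cons_succ]
        exact cons_getD_set_perm xs j x (by simpa using hj)
    | succ i =>
      cases j with
      | zero =>
        simp only [swapN, List.getD_cons_succ, List.getD_cons_zero, List.set_cons_succ,
          List.set_cons_zero]
        exact cons_getD_set_perm xs i x (by simpa using hi)
      | succ j =>
        simp only [swapN, List.getD_cons_succ, List.set_cons_succ]
        exact (ih i j (by simpa using hi) (by simpa using hj)).cons x

-- step facts
theorem shape_refl (M : List Int) : ShapeP M M := by
  exact ⟨rfl, fun _ _ _ => rfl⟩

theorem getD_out_of_range (M : List Int) (i : Nat) (h : ¬ i < M.length) : M.getD i 0 = 0 :=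
  List.getD_eq_default _ _ (by omega)

theorem i_lt_of_cond (M : List Int) (i j : Nat)
    (hc : M.getD i 0 > M.getD j 0 ∧ 0 ≤ M.getD i 0 ∧ 0 ≤ M.getD j 0) : i < M.length := by
  by_contra h
  rw [getD_out_of_range M i h] at hc
  omega

theorem stepN_perm (M : List Int) (i : Nat) : (stepN M i).Perm M := by
  unfold stepN
  cases h : findJ M i i with
  | none => exact List.Perm.refl M
  | some j =>
    obtain ⟨_, hj, hc, _⟩ := findJ_some M i i j h
    exact swapN_perm M i j (i_lt_of_cond M i j hc) hj

theorem stepN_shape (M : List Int) (i : Nat) : ShapeP M (stepN M i) := by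
  unfold stepN
  cases h : findJ M i i with
  | none => exact shape_refl M
  | some j =>
    obtain ⟨_, hj, hc, _⟩ := findJ_some M i i j h
    have hi := i_lt_of_cond M i j hc
    refine ⟨length_swapN M i j, fun p hp hneg => ?_⟩
    rw [getD_swapN M i j p hi hj] at hneg ⊢
    split_ifs with h1 h2 <;> [skip; skip; rfl]
    · subst h1; omega
    · subst h2; omega

theorem shape_trans {M N K : List Int} (h1 : ShapeP M N) (h2 : ShapeP N K) : ShapeP M K := by
  obtain ⟨hl1, hv1⟩ := h1
  obtain ⟨hl2, hv2⟩ := h2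
  refine ⟨by omega, fun p hp hneg => ?_⟩
  rcases hneg with hneg | hneg
  · have e1 := hv1 p hp (Or.inl hneg)
    have e2 := hv2 p (by omega) (Or.inl (by omega))
    omega
  · by_cases hN : N.getD p 0 < 0
    · have e1 := hv1 p hp (Or.inr hN)
      have e2 := hv2 p (by omega) (Or.inl hN)
      omega
    · have e2 := hv2 p (by omega) (Or.inr hneg)
      omega

theorem stepN_Inv (M : List Int) (s i : Nat) (hInv : SInv M s) (hi : i < s) :
    SInv (stepN M i) s := by
  cases h : findJ M i i with
  | none =>
    have hstep : stepN M i = M := by unfold stepN; rw [h]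
    rw [hstep]
    exact hInv
  | some j =>
    have hstep : stepN M i = swapN M i j := by unfold stepN; rw [h]
    rw [hstep]
    obtain ⟨hij, hjlen, hc, _⟩ := findJ_some M i i j h
    have hilen := i_lt_of_cond M i j hc
    have hij' : i ≠ j := by intro e; rw [e] at hc; omega
    have hjs : j < s := by
      by_contra hjs
      have := hInv i j (by omega) hjlen (by omega) hc.2.1 hc.2.2
      omega
    intro p q hpq hqlen hsq hnp hnq
    rw [length_swapN] at hqlen
    rw [getD_swapN M i j q hilen hjlen, if_neg (by omega), if_neg (by omega)] at hnq ⊢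
    rw [getD_swapN M i j p hilen hjlen] at hnp ⊢
    split_ifs at hnp ⊢ with h1 h2
    · exact hInv i q (by omega) hqlen hsq hnp hnq
    · exact hInv j q (by omega) hqlen hsq hnp hnq
    · exact hInv p q hpq hqlen hsq hnp hnq

theorem stepN_DInv (M : List Int) (i : Nat) (hD : DInv M i) :
    DInv (stepN M i) (i + 1) := by
  cases h : findJ M i i with
  | none =>
    have hstep : stepN M i = M := by unfold stepN; rw [h]
    rw [hstep]
    have hnone := findJ_none M i i h
    intro p q hp hq hqlen hnp hnq hfirst
    by_cases hgi : 0 ≤ M.getD i 0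
    · have hilen : i < M.length := by omega
      have hq' := hnone q (by omega) hqlen
      have hgq : M.getD i 0 ≤ M.getD q 0 := by
        by_contra hlt
        exact hq' ⟨by omega, hgi, hnq⟩
      rcases Nat.lt_succ_iff_lt_or_eq.mp hp with hpi | heqp
      · have := hD p i hpi (le_refl i) (by omega) hnp hgi (fun r h1 h2 => by omega)
        omega
      · rw [heqp]
        omega
    · rcases Nat.lt_succ_iff_lt_or_eq.mp hp with hpi | heqp
      · exact hD p q hpi (by omega) hqlen hnp hnq
          (fun r h1 h2 => by
            rcases Nat.eq_or_lt_of_le h1 with heqr | h3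
            · rw [← heqr]; exact hgi
            · exact hfirst r (by omega) h2)
      · rw [heqp] at hnp
        exact absurd hnp hgi
  | some j =>
    have hstep : stepN M i = swapN M i j := by unfold stepN; rw [h]
    rw [hstep]
    obtain ⟨hij, hjlen, hc, hmin⟩ := findJ_some M i i j h
    have hilen := i_lt_of_cond M i j hc
    have hij' : i < j := by
      rcases Nat.eq_or_lt_of_le hij with rfl | h2
      · exfalso; omega
      · exact h2
    intro p q hp hq hqlen hnp hnq hfirst
    rw [length_swapN] at hqlen
    have hqj : q ≤ j := by
      by_contra hqj
      refine hfirst j (by omega) (by omega) ?_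
      rw [getD_swapN M i j j hilen hjlen, if_pos rfl]
      exact hc.2.1
    rcases Nat.eq_or_lt_of_le hqj with heq | hqlt
    · rw [getD_swapN M i j q hilen hjlen, if_pos heq]
      rcases Nat.lt_succ_iff_lt_or_eq.mp hp with hpi | heqp
      · rw [getD_swapN M i j p hilen hjlen, if_neg (by omega), if_neg (by omega)] at hnp ⊢
        have := hD p i hpi (le_refl i) (by omega) hnp hc.2.1 (fun r h1 h2 => by omega)
        omega
      · rw [getD_swapN M i j p hilen hjlen, if_neg (by omega), if_pos heqp]
        omega
    · rw [getD_swapN M i j q hilen hjlen, if_neg (by omega), if_neg (by omega)] at hnq ⊢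
      have hq_ge : M.getD i 0 ≤ M.getD q 0 := by
        have hm := hmin q (by omega) hqlt
        by_contra hlt
        exact hm ⟨by omega, hc.2.1, hnq⟩
      rcases Nat.lt_succ_iff_lt_or_eq.mp hp with hpi | heqp
      · rw [getD_swapN M i j p hilen hjlen, if_neg (by omega), if_neg (by omega)] at hnp ⊢
        have := hD p i hpi (le_refl i) (by omega) hnp hc.2.1 (fun r h1 h2 => by omega)
        omega
      · rw [getD_swapN M i j p hilen hjlen, if_neg (by omega), if_pos heqp]
        omega

theorem DInv_zero (M : List Int) : DInv M 0 := by
  intro p _ hp _ _ _ _ _; omega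

theorem Inv_of_DInv (M : List Int) (l : Nat) (hD : DInv M l) (hI : SInv M (l + 1)) :
    SInv M l := by
  intro p q hpq hqlen hsq hnp hnq
  rcases Nat.eq_or_lt_of_le hsq with heq | hlt
  · exact hD p q (by omega) (by omega) hqlen hnp hnq (fun r h1 h2 => by omega)
  · exact hI p q hpq hqlen (by omega) hnp hnq

theorem passN_facts (M : List Int) (l k : Nat) (hk : k ≤ l) (hI : SInv M (l + 1)) :
    DInv (passN M k) k ∧ SInv (passN M k) (l + 1) ∧ ShapeP M (passN M k) ∧ (passN M k).Perm M := by
  induction k with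
  | zero => exact ⟨DInv_zero M, hI, shape_refl M, List.Perm.refl M⟩
  | succ k ih =>
    obtain ⟨hD, hIk, hS, hP⟩ := ih (by omega)
    exact ⟨stepN_DInv _ k hD, stepN_Inv _ _ k hIk (by omega),
      shape_trans hS (stepN_shape _ k), (stepN_perm _ k).trans hP⟩

theorem outerN_facts (k : Nat) (M : List Int) (hI : SInv M (k + 1)) :
    SInv (outerN M (descList k)) 1 ∧ ShapeP M (outerN M (descList k)) ∧
      (outerN M (descList k)).Perm M := by
  induction k generalizing M with
  | zero => exact ⟨hI, shape_refl M, List.Perm.refl M⟩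
  | succ k ih =>
    obtain ⟨hD, hIk, hS, hP⟩ := passN_facts M (k + 1) (k + 1) (le_refl _) hI
    obtain ⟨h1, h2, h3⟩ := ih (passN M (k + 1)) (Inv_of_DInv _ _ hD hIk)
    exact ⟨h1, shape_trans hS h2, h3.trans hP⟩

theorem buble_facts (L : List Int) :
    SInv (buble L) 1 ∧ ShapeP L (buble L) ∧ (buble L).Perm L := by
  have hI : SInv L ((L.length - 1) + 1) := by
    intro p q hpq hqlen hsq _ _
    omega
  rw [buble_eq_outerN]
  exact outerN_facts (L.length - 1) L hI

theorem SInv_tail (x : Int) (xs : List Int) (h : SInv (x :: xs) 1) : SInv xs 1 := by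
  intro p q hpq hqlen hsq hnp hnq
  have := h (p + 1) (q + 1) (by omega) (by simpa using Nat.succ_lt_succ hqlen) (by omega)
  simpa using this hnp hnq

theorem Inv_one_pairwise (M : List Int) (h : SInv M 1) :
    (M.filter (fun x => decide (0 ≤ x))).Pairwise (· ≤ ·) := by
  induction M with
  | nil => simp
  | cons x xs ih =>
    by_cases hx : 0 ≤ x
    · rw [List.filter_cons_of_pos (by simpa using hx)]
      refine List.Pairwise.cons ?_ (ih (SInv_tail x xs h))
      intro y hy
      have hy' := List.mem_filter.mp hy
      obtain ⟨q, hq, rfl⟩ := List.mem_iff_getElem.mp hy'.1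
      have := h 0 (q + 1) (by omega) (by simpa using Nat.succ_lt_succ hq) (by omega)
        (by simpa using hx)
      simp only [List.getD_cons_zero, List.getD_cons_succ] at this
      rw [List.getD_eq_getElem xs 0 hq] at this
      exact this (by simpa using hy'.2)
    · rw [List.filter_cons_of_neg (by simpa using hx)]
      exact ih (SInv_tail x xs h)

theorem shape_tail (x y : Int) (L M : List Int) (h : ShapeP (x :: L) (y :: M)) :
    ShapeP L M := by
  obtain ⟨hl, hv⟩ := h
  refine ⟨by simpa using hl, fun p hp hneg => ?_⟩
  have := hv (p + 1) (by simpa using Nat.succ_lt_succ hp) (by simpa using hneg)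
  simpa using this

theorem fill_shape (L : List Int) : ∀ M : List Int, ShapeP L M →
    fillNonNeg L (M.filter (fun x => decide (0 ≤ x))) = M := by
  induction L with
  | nil =>
    intro M h
    have : M = [] := List.length_eq_zero_iff.mp (by simpa using h.1)
    simp [this, fillNonNeg]
  | cons x L ih =>
    intro M h
    obtain ⟨y, M', rfl⟩ : ∃ y M', M = y :: M' := by
      cases M with
      | nil => exact absurd h.1 (by simp)
      | cons y M' => exact ⟨y, M', rfl⟩
    have hhead := h.2 0 (by simp)
    simp only [List.getD_cons_zero] at hhead
    by_cases hx : x < 0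
    · have hyx : y = x := hhead (Or.inl hx)
      rw [List.filter_cons_of_neg (by simp [hyx]; omega)]
      simp only [fillNonNeg, if_pos hx]
      rw [ih M' (shape_tail x y L M' h), hyx]
    · have hy : ¬ y < 0 := fun hy => hx (by rw [← hhead (Or.inr hy)]; exact hy)
      rw [List.filter_cons_of_pos (by simpa using not_lt.mp hy)]
      simp only [fillNonNeg, if_neg hx]
      rw [ih M' (shape_tail x y L M' h)]

-- ===== VERDICT (by name: the statement is the Claim_ definition above) =====
theorem buble_spec : Claim_equal_buble := by
  intro L _
  unfold Spec_buble buble_alt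
  obtain ⟨hInv, hShape, hPerm⟩ := buble_facts L
  have hsorted : PySem.List.sorted (L.filter (fun x => decide (0 ≤ x))) (fun x => x) false
      = (buble L).filter (fun x => decide (0 ≤ x)) :=
    PySem.List.sorted_id_eq_of_perm_of_pairwise _ _ (hPerm.filter _) (Inv_one_pairwise _ hInv)
  rw [hsorted, fill_shape L (buble L) hShape]
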